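-- pv_equiv track=rewrite | github.com/TtuTtuRru/test_PL | task1/task1.py | path_circle
-- ===== SOURCE A (Python) =====
-- def path_circle(n, m):
--
--     current = 1
--     path = []
--
--     while True:
--
--         path.append(str(current))
--         current = (current + m - 1) % n
--
--         if current == 0:
--             current = n
--
--         if current == 1:
--             break
--
--     return ''.join(path)
-- ===== SOURCE B (Python) =====
-- def path_circle(n, m):
--     step = (m - 1) % n
--     a, b = n, step
--     while b:
--         a, b = b, a % b
--     return ''.join(str(k * step % n + 1) for k in range(n // a))
-- ===== Notes on version B (the rewrite author's own statement) =====
-- stated objective: alternative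
-- what changed: Replaces A's step-until-return loop (running accumulator, wraparound remap, break test) by number theory: the cycle length is n // gcd(n, (m-1) % n), computed once by Euclid's algorithm, and the output is generated as a fixed-length comprehension over range of that count with pos = k*step % n + 1 and no termination test.
import Mathlib
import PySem

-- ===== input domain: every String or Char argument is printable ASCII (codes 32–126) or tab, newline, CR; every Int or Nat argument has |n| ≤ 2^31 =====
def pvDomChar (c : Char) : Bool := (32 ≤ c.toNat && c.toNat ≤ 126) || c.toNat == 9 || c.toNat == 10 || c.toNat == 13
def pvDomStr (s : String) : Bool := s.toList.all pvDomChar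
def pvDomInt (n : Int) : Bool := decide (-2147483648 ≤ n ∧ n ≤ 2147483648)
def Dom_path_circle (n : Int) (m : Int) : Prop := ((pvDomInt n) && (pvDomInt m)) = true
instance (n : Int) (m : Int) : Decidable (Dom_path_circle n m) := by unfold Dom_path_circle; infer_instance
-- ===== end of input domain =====

-- B replaces A's step-until-return loop by number theory: the cycle length is
-- n // gcd(n, (m-1) % n), computed once by Euclid, and the string is generated as a
-- fixed-length comprehension with pos = k*step % n + 1; alternative decomposition.

-- ===== PORT A =====
-- A's while-loop; the fuel argument only makes the recursion total (n.toNat + 1 steps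
-- always suffice for n ≥ 1, since the loop breaks after at most n appends).
def pathCircleLoopA (n m : Int) : Nat → Int → List String → String
  | 0, _, acc => PySem.Str.join "" acc
  | fuel+1, current, acc =>
    let acc' := acc ++ [PySem.Int.toStr current]
    let c0 := PySem.Int.mod (current + m - 1) n
    let c1 := if c0 = 0 then n else c0
    if c1 = 1 then PySem.Str.join "" acc'
    else pathCircleLoopA n m fuel c1 acc'

def path_circle (n : Int) (m : Int) : String :=
  pathCircleLoopA n m (n.toNat + 1) 1 []

-- ===== PORT B =====
-- Source B's `while b: a, b = b, a % b`; the fuel only makes the recursion total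
-- (b.toNat + 1 steps suffice since 0 ≤ a % b < b when b > 0).
def euclidB : Nat → Int → Int → Int
  | 0, a, _ => a
  | fuel+1, a, b => if b = 0 then a else euclidB fuel b (PySem.Int.mod a b)

def path_circle_alt (n : Int) (m : Int) : String :=
  let step := PySem.Int.mod (m - 1) n
  let a := euclidB (step.toNat + 1) n step
  PySem.Str.join "" ((PySem.List.pyRange 0 (PySem.Int.floordiv n a) 1).map
    (fun k => PySem.Int.toStr (PySem.Int.mod (k * step) n + 1)))

-- ===== PRECONDITION & SPEC =====
-- Pre_ excludes n = 0 (Python A raises ZeroDivisionError) and n < 0 (A's while loop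
-- never reaches current == 1 and diverges); A returns a value exactly when 1 ≤ n.
def Pre_path_circle (n : Int) (m : Int) : Prop := 1 ≤ n
instance (n : Int) (m : Int) : Decidable (Pre_path_circle n m) := by unfold Pre_path_circle; infer_instance
def pvWitness_path_circle : Int × Int := (5, 3)

def Spec_path_circle (n : Int) (m : Int) (out : String) : Prop := out = path_circle_alt n m
instance (n : Int) (m : Int) (out : String) : Decidable (Spec_path_circle n m out) := by unfold Spec_path_circle; infer_instance

-- ===== CLAIM (what is proved, stated in full; the proofs are below) =====
def Claim_equal_path_circle : Prop := ∀ (n : Int) (m : Int), Dom_path_circle n m → Pre_path_circle n m → Spec_path_circle n m (path_circle n m)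

-- ===== LEMMAS AND PROOFS =====

-- B's Euclid loop computes Int.gcd (for 0 < a, 0 ≤ b, and enough fuel).
theorem euclidB_eq_gcd : ∀ (fuel : Nat) (a b : Int), 0 < a → 0 ≤ b → b.toNat < fuel →
    euclidB fuel a b = Int.gcd a b := by
  intro fuel
  induction fuel with
  | zero => omega
  | succ f ih =>
    intro a b ha hb hf
    simp only [euclidB]
    by_cases h0 : b = 0
    · simp [h0, Int.gcd, Int.natAbs_of_nonneg ha.le]
    · have hbpos : 0 < b := lt_of_le_of_ne hb (Ne.symm h0)
      rw [if_neg h0, PySem.Int.mod_eq_emod_of_pos hbpos,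
        ih b (a % b) hbpos (Int.emod_nonneg a h0) (by
          have := Int.emod_lt_of_pos a hbpos
          have := Int.emod_nonneg a h0
          omega)]
      rw [Int.gcd_comm, Int.gcd_emod]

-- N ∣ j*S iff the period N / gcd(N,S) divides j.
theorem dvd_mul_iff_periodDvd (N S : Nat) (hN : 0 < N) (j : Nat) :
    N ∣ j * S ↔ (N / Nat.gcd N S) ∣ j := by
  set g := Nat.gcd N S with hgdef
  have hg : 0 < g := Nat.gcd_pos_of_pos_left _ hN
  have hNL : g * (N / g) = N := Nat.mul_div_cancel' (Nat.gcd_dvd_left N S)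
  have hSS : g * (S / g) = S := Nat.mul_div_cancel' (Nat.gcd_dvd_right N S)
  have cop : Nat.Coprime (N / g) (S / g) := Nat.coprime_div_gcd_div_gcd hg
  constructor
  · intro h
    have h1 : g * (N / g) ∣ g * (j * (S / g)) := by
      rw [hNL, show g * (j * (S / g)) = j * (g * (S / g)) by ring, hSS]; exact h
    exact cop.dvd_of_dvd_mul_right ((Nat.mul_dvd_mul_iff_left hg).mp h1)
  · rintro ⟨t, rfl⟩
    have h1 : g ∣ t * S := Dvd.dvd.mul_left (Nat.gcd_dvd_right N S) t
    have h2 : N / g * g ∣ N / g * (t * S) := mul_dvd_mul_left _ h1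
    rwa [Nat.div_mul_cancel (Nat.gcd_dvd_left N S),
      show N / g * (t * S) = N / g * t * S by ring] at h2

-- A's loop, started at the k-th position k*S % N + 1, produces exactly the tail of
-- B's comprehension from index k to the period L = N / gcd(N,S).
theorem loopA_eq (N S : Nat) (m : Int) (hN : 0 < N) (hSN : S < N)
    (hstep : PySem.Int.mod (m - 1) (↑N) = ↑S) :
    ∀ (fuel k : Nat) (acc : List String), k < N / Nat.gcd N S → N / Nat.gcd N S ≤ k + fuel →
      pathCircleLoopA (↑N) m fuel (↑(k * S % N) + 1) acc =
        PySem.Str.join "" (acc ++ ((PySem.List.pyRange (↑k) (↑(N / Nat.gcd N S)) 1).map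
          (fun j => PySem.Int.toStr (PySem.Int.mod (j * ↑S) (↑N) + 1)))) := by
  intro fuel
  induction fuel with
  | zero => intro k acc hk hf; omega
  | succ f ih =>
    intro k acc hk hf
    have hnpos : (0:Int) < ↑N := by exact_mod_cast hN
    set L := N / Nat.gcd N S with hLdef
    have hfk : PySem.Int.toStr (PySem.Int.mod ((↑k : Int) * ↑S) (↑N) + 1) =
        PySem.Int.toStr (↑(k * S % N) + 1) := by
      rw [show ((↑k : Int) * ↑S) = ((k * S : Nat) : Int) by push_cast; ring,
        PySem.Int.mod_natCast]
    set T := (k + 1) * S % N with hTdef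
    have hTlt : T < N := Nat.mod_lt _ hN
    have hS' : ((S:Int)) % ↑N = ↑S := Int.emod_eq_of_lt (by positivity) (by exact_mod_cast hSN)
    have e1 : ((k * S : Nat) : Int) % ↑N ≡ ↑(k * S) [ZMOD ↑N] := Int.emod_emod_of_dvd _ dvd_rfl
    have e2 : m ≡ ↑S + 1 [ZMOD ↑N] := by
      have h0 : (m - 1) ≡ (↑S : Int) [ZMOD ↑N] := by
        show (m - 1) % ↑N = ↑S % ↑N
        rw [PySem.Int.mod_eq_emod_of_pos hnpos] at hstep
        rw [hstep, hS']
      have h := h0.add_right 1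
      rwa [sub_add_cancel] at h
    have e4 : ((k * S : Nat) : Int) + (↑S + 1) ≡ ↑T + 1 [ZMOD ↑N] := by
      have h5 : ((k * S : Nat) : Int) + (↑S + 1) = ↑((k+1) * S) + 1 := by push_cast; ring
      have h6 : (↑((k+1) * S) : Int) ≡ ↑T [ZMOD ↑N] := by
        rw [hTdef, Int.natCast_mod]
        exact (Int.emod_emod_of_dvd _ dvd_rfl).symm
      rw [h5]
      exact h6.add_right 1
    have hc0 : PySem.Int.mod ((↑(k * S % N) + 1 : Int) + m - 1) (↑N) = ((↑T : Int) + 1) % ↑N := by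
      rw [PySem.Int.mod_eq_emod_of_pos hnpos,
        show ((↑(k * S % N) + 1 : Int) + m - 1) = ((k * S : Nat) : Int) % ↑N + m by
          rw [Int.natCast_mod]; ring]
      exact (e1.add e2).trans e4
    have hc1 : (if PySem.Int.mod ((↑(k * S % N) + 1 : Int) + m - 1) (↑N) = 0 then (↑N : Int)
        else PySem.Int.mod ((↑(k * S % N) + 1 : Int) + m - 1) (↑N)) = ↑T + 1 := by
      rw [hc0]
      by_cases he : T + 1 = N
      · have heq : ((↑T : Int) + 1) = ↑N := by exact_mod_cast congrArg (Nat.cast : Nat → Int) he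
        rw [heq, Int.emod_self]
        simp [heq.symm]
      · have hlt : ((↑T : Int) + 1) < ↑N := by
          have : T + 1 < N := by omega
          exact_mod_cast this
        rw [Int.emod_eq_of_lt (by positivity) hlt]
        have hne : ((↑T : Int) + 1) ≠ 0 := by positivity
        simp [hne]
    have hbreak : (T = 0) ↔ (k + 1 = L) := by
      constructor
      · intro h0
        have hdvd : N ∣ (k + 1) * S := Nat.dvd_of_mod_eq_zero h0
        have hd2 := (dvd_mul_iff_periodDvd N S hN (k+1)).mp hdvd
        have hle := Nat.le_of_dvd (by omega) hd2
        omega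
      · intro h
        have hdL : L ∣ (k + 1) := h ▸ dvd_rfl
        have hdvd := (dvd_mul_iff_periodDvd N S hN (k+1)).mpr hdL
        simpa [hTdef] using Nat.mod_eq_zero_of_dvd hdvd
    simp only [pathCircleLoopA]
    rw [hc1]
    by_cases hend : k + 1 = L
    · have hT0 : T = 0 := hbreak.mpr hend
      rw [if_pos (by rw [hT0]; norm_num)]
      have hrange : PySem.List.pyRange (↑k) (↑L) 1 = [(↑k : Int)] := by
        rw [PySem.List.pyRange_one_cons (by exact_mod_cast hk),
          PySem.List.pyRange_one_eq_nil (by exact_mod_cast hend.ge)]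
      rw [hrange]
      simp [hfk]
    · have hT0 : T ≠ 0 := fun h => hend (hbreak.mp h)
      rw [if_neg (by
        intro h
        apply hT0
        have : ((↑T : Int)) = 0 := by linarith [congrArg id h]
        exact_mod_cast this)]
      have hk1 : k + 1 < L := by omega
      have := ih (k+1) (acc ++ [PySem.Int.toStr (↑(k * S % N) + 1)]) hk1 (by omega)
      rw [show ((↑(k+1) : Int)) = (↑k : Int) + 1 by push_cast; ring] at this
      rw [this]
      conv_rhs => rw [PySem.List.pyRange_one_cons (show ((↑k : Int)) < ↑L by exact_mod_cast hk)]
      simp [hfk]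

theorem main_eq (n m : Int) (hn : 1 ≤ n) : path_circle n m = path_circle_alt n m := by
  obtain ⟨N, rfl⟩ := Int.eq_ofNat_of_zero_le (by omega : (0:Int) ≤ n)
  have hN : 0 < N := by exact_mod_cast hn
  have hnpos : (0:Int) < ↑N := by exact_mod_cast hN
  set step := PySem.Int.mod (m - 1) (↑N : Int) with hstepdef
  have hstep_nonneg : 0 ≤ step := PySem.Int.mod_nonneg _ hnpos
  have hstep_lt : step < ↑N := PySem.Int.mod_lt _ hnpos
  set S := step.toNat with hSdef
  have hs : step = ↑S := (Int.toNat_of_nonneg hstep_nonneg).symm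
  have hSN : S < N := by omega
  have hstep : PySem.Int.mod (m - 1) (↑N : Int) = ↑S := by rw [← hstepdef, hs]
  have hgcd : euclidB (S + 1) (↑N) (↑S) = ↑(Nat.gcd N S) := by
    rw [euclidB_eq_gcd (S+1) _ _ hnpos (by positivity) (by simp)]
    simp [Int.gcd]
  have hgpos : 0 < Nat.gcd N S := Nat.gcd_pos_of_pos_left _ hN
  have hLpos : 0 < N / Nat.gcd N S :=
    Nat.div_pos (Nat.le_of_dvd hN (Nat.gcd_dvd_left N S)) hgpos
  have hLle : N / Nat.gcd N S ≤ N := Nat.div_le_self _ _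
  have hdiv : PySem.Int.floordiv (↑N) (↑(Nat.gcd N S)) = ↑(N / Nat.gcd N S) := by
    exact_mod_cast PySem.Int.floordiv_natCast N (Nat.gcd N S)
  unfold path_circle path_circle_alt
  simp only [← hstepdef, hs, Int.toNat_natCast, hgcd, hdiv]
  have h1 : (1 : Int) = ↑(0 * S % N) + 1 := by simp
  rw [h1, loopA_eq N S m hN hSN hstep (N + 1) 0 [] hLpos (by omega)]
  simp

-- ===== VERDICT (by name: the statement is the Claim_ definition above) =====
theorem path_circle_spec : Claim_equal_path_circle := by
  intro n m _ hpre
  unfold Spec_path_circle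
  exact main_eq n m hpre
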